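-- pv_equiv track=rewrite | github.com/HarmvandenBrand/NML_Podcast_Transcription | src/scripts/preprocess_transcript.py | split_on_sentences
-- ===== SOURCE A (Python) =====
-- def split_on_sentences(transcript):
--     # Find indices for sentence splits
--     split_ids = []
--     for idx, word_data in enumerate(transcript):
--         # Following line works, kudo's for who can explain why. I just tried that for fun...
--         #splits.append(idx) if '.' in word_data[0] else ...
--         if '.' in word_data[0] or '?' in word_data[0]: split_ids.append(idx)
--
--     # Divide the transcript in chunks based on split points
--     sentence_chunks = []
--     prev_id = 0
--     for id in split_ids:
--         sentence_chunks.append(transcript[prev_id:id+1])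
--         prev_id = id+1
--     return sentence_chunks
-- ===== SOURCE B (Python) =====
-- def split_on_sentences(transcript):
--     # One streaming pass: accumulate the current chunk, emit it at each
--     # sentence-ending word; trailing words after the last split are dropped.
--     chunks = []
--     current = []
--     for word_data in transcript:
--         current.append(word_data)
--         if '.' in word_data[0] or '?' in word_data[0]:
--             chunks.append(current)
--             current = []
--     return chunks
-- ===== Notes on version B (the rewrite author's own statement) =====
-- stated objective: simpler
-- what changed: Replaces the two-pass index-collection-then-slicing approach with a single streaming pass that accumulates the current chunk and emits it at each sentence-ending word (trailing partial chunk dropped, as in A).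
import Mathlib
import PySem

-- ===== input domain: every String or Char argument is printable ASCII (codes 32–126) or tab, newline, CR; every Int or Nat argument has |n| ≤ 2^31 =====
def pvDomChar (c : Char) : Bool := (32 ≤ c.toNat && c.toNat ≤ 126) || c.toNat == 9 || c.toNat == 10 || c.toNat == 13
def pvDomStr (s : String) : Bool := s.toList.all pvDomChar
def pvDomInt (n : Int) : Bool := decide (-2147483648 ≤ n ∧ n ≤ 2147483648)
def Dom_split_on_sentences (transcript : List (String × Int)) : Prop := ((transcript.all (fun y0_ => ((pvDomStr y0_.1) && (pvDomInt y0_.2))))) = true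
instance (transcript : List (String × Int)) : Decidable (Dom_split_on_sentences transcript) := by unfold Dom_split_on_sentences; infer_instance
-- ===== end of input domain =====

-- B replaces A's two-pass index-then-slice scheme with one streaming pass that
-- accumulates the current chunk and emits it at each sentence-ending word (simpler).


-- ===== PORT A =====
def split_on_sentences (transcript : List (String × Int)) : List (List (String × Int)) :=
  -- split_ids: indices of words containing '.' or '?'
  let split_ids : List Int :=
    (PySem.List.enumerate transcript 0).foldl
      (fun acc p => if PySem.Str.isIn "." p.2.1 || PySem.Str.isIn "?" p.2.1 then acc ++ [p.1] else acc) []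
  -- chunks: slices transcript[prev_id : id+1]
  let r :=
    split_ids.foldl
      (fun (st : List (List (String × Int)) × Int) id =>
        (st.1 ++ [PySem.List.slice transcript (some st.2) (some (id + 1))], id + 1))
      ([], 0)
  r.1

-- ===== PORT B =====
def split_on_sentences_alt (transcript : List (String × Int)) : List (List (String × Int)) :=
  -- one streaming pass with state (chunks, current)
  let r :=
    transcript.foldl
      (fun (st : List (List (String × Int)) × List (String × Int)) wd =>
        let cur := st.2 ++ [wd]
        if PySem.Str.isIn "." wd.1 || PySem.Str.isIn "?" wd.1 then (st.1 ++ [cur], []) else (st.1, cur))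
      ([], [])
  r.1

-- ===== PRECONDITION & SPEC =====
def Spec_split_on_sentences (transcript : List (String × Int)) (out : List (List (String × Int))) : Prop := out = split_on_sentences_alt transcript
instance (transcript : List (String × Int)) (out : List (List (String × Int))) : Decidable (Spec_split_on_sentences transcript out) := by unfold Spec_split_on_sentences; infer_instance

-- ===== CLAIM (what is proved, stated in full; the proofs are below) =====
def Claim_equal_split_on_sentences : Prop := ∀ (transcript : List (String × Int)), Dom_split_on_sentences transcript → Spec_split_on_sentences transcript (split_on_sentences transcript)

-- ===== LEMMAS AND PROOFS =====

/-- reference chunking: carry the current partial chunk `cur`, emit it at each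
    sentence-ending word, drop the trailing partial chunk -/
def chunksRef (cur : List (String × Int)) : List (String × Int) → List (List (String × Int))
  | [] => []
  | x :: xs =>
    if PySem.Str.isIn "." x.1 || PySem.Str.isIn "?" x.1
    then (cur ++ [x]) :: chunksRef [] xs
    else chunksRef (cur ++ [x]) xs

/-- A's first pass (index collection) with an enumerate offset -/
def gIds (l : List (String × Int)) (s : Int) : List Int :=
  (PySem.List.enumerate l s).foldl
    (fun acc p => if PySem.Str.isIn "." p.2.1 || PySem.Str.isIn "?" p.2.1 then acc ++ [p.1] else acc) []

lemma gIds_cons (x : String × Int) (l : List (String × Int)) (s : Int) :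
    gIds (x :: l) s
      = (if PySem.Str.isIn "." x.1 || PySem.Str.isIn "?" x.1 then [s] else []) ++ gIds l (s + 1) := by
  unfold gIds
  rw [PySem.List.enumerate_cons]
  simp only [List.foldl_cons]
  rw [PySem.List.foldl_append_if, PySem.List.foldl_append_if]
  split_ifs <;> simp

/-- B's fold peeled against the reference -/
lemma B_fold (l : List (String × Int)) :
    ∀ (chunks : List (List (String × Int))) (cur : List (String × Int)),
    (l.foldl
      (fun (st : List (List (String × Int)) × List (String × Int)) wd =>
        let c := st.2 ++ [wd]
        if PySem.Str.isIn "." wd.1 || PySem.Str.isIn "?" wd.1 then (st.1 ++ [c], []) else (st.1, c))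
      (chunks, cur)).1 = chunks ++ chunksRef cur l := by
  induction l with
  | nil => intro chunks cur; simp [chunksRef]
  | cons x xs ih =>
    intro chunks cur
    rw [List.foldl_cons]
    show (List.foldl _
      (if PySem.Str.isIn "." x.1 || PySem.Str.isIn "?" x.1
       then (chunks ++ [cur ++ [x]], []) else (chunks, cur ++ [x])) xs).1 = _
    rw [chunksRef]
    cases h : (PySem.Str.isIn "." x.1 || PySem.Str.isIn "?" x.1) with
    | true => rw [if_pos rfl, ih, List.append_assoc]; rfl
    | false => rw [if_neg (by simp), ih]; simp

/-- A's second pass (slicing at the collected absolute indices) against the reference: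
    `prev` is the absolute start of the current partial chunk -/
lemma A_fold (t : List (String × Int)) (l : List (String × Int)) :
    ∀ (p prev : ℕ) (chunks : List (List (String × Int))),
    t.drop p = l → prev ≤ p →
    ((gIds l (p : Int)).foldl
      (fun (st : List (List (String × Int)) × Int) id =>
        (st.1 ++ [PySem.List.slice t (some st.2) (some (id + 1))], id + 1))
      (chunks, (prev : Int))).1
    = chunks ++ chunksRef ((t.drop prev).take (p - prev)) l := by
  induction l with
  | nil => intro p prev chunks _ _; simp [gIds, PySem.List.enumerate, chunksRef]
  | cons x xs ih =>
    intro p prev chunks hd hle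
    have hp : p < t.length := by
      by_contra h
      rw [not_lt] at h
      simp [List.drop_eq_nil_of_le h] at hd
    have hget : t[p]? = some x := by
      rw [← List.head?_drop, hd]; rfl
    have hxs : t.drop (p + 1) = xs := by
      have h1 : t.drop (p + 1) = (t.drop p).drop 1 := by rw [List.drop_drop]
      rw [h1, hd]; rfl
    have htake : ∀ q : ℕ, q ≤ p →
        (t.drop q).take (p + 1 - q) = (t.drop q).take (p - q) ++ [x] := by
      intro q hq
      have h1 : p + 1 - q = (p - q) + 1 := by omega
      rw [h1, List.take_add_one]
      congr 1
      have h2 : (t.drop q)[p - q]? = t[q + (p - q)]? := List.getElem?_drop ..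
      have h3 : q + (p - q) = p := by omega
      rw [h2, h3, hget]; rfl
    have hcast : ((p : Int) + 1) = (((p + 1 : ℕ)) : Int) := by push_cast; ring
    rw [gIds_cons, List.foldl_append, chunksRef]
    cases hsep : (PySem.Str.isIn "." x.1 || PySem.Str.isIn "?" x.1) with
    | true =>
      rw [if_pos rfl, if_pos rfl]
      simp only [List.foldl_cons, List.foldl_nil]
      have hslice : PySem.List.slice t (some (prev : Int)) (some ((p : Int) + 1))
          = (t.drop prev).take (p + 1 - prev) := by
        rw [hcast, PySem.List.slice_natCast]
      rw [hslice, htake prev hle, hcast,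
        ih (p + 1) (p + 1) (chunks ++ [(t.drop prev).take (p - prev) ++ [x]]) hxs (le_refl _)]
      simp
    | false =>
      rw [if_neg (by simp), if_neg (by simp)]
      simp only [List.foldl_nil]
      rw [hcast, ih (p + 1) prev chunks hxs (by omega), htake prev hle]

-- ===== VERDICT (by name: the statement is the Claim_ definition above) =====
theorem split_on_sentences_spec : Claim_equal_split_on_sentences := by
  intro t _
  unfold Spec_split_on_sentences
  have hA := A_fold t t 0 0 [] (by simp) (le_refl _)
  have hB := B_fold t [] []
  simp only [Nat.cast_zero, Nat.sub_zero, List.drop_zero, List.take_zero, List.nil_append] at hA hB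
  exact hA.trans hB.symm
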